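-- pv_equiv track=rewrite | github.com/TonMarton/PyBites | 29/wrong_char.py | get_index_different_char
-- ===== SOURCE A (Python) =====
-- def get_index_different_char(chars: list):
--     alnum_count: int = 0
--     last_alnum_index: int = None
--     last_non_alnum_index: int = None
--
--     for i in range(3):
--         if str(chars[i]).isalnum():
--             alnum_count += 1
--             last_alnum_index = i
--         else:
--             last_non_alnum_index = i
--
--     if alnum_count > 1:
--         if last_non_alnum_index != None:
--             return last_non_alnum_index
--         else:
--             for i in range(3, len(chars)):
--                 if not str(chars[i]).isalnum():
--                     return i
--     elif alnum_count < 2: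
--         if last_alnum_index != None:
--             return last_alnum_index
--         else:
--             for i in range(3, len(chars)):
--                 if str(chars[i]).isalnum():
--                     return i
--
--     import string
--
--     alphanumeric_chars = list(string.ascii_letters + string.digits)
--
--     def get_index_different_char_official(chars):
--         matches, no_matches = [], []
--         for i, char in enumerate(chars):
--             if str(char).lower() in alphanumeric_chars:
--                 matches.append(i)
--         else:
--                 no_matches.append(i)
--         return matches[0] if len(matches) == 1 else no_matches[0]
--
--     def get_index_different_char_smart(chars):
--         bools = [str(c).isalnum() for c in chars]
--         return bools.index(True) if bools.count(True) == 1 else bools.index(False)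
-- ===== SOURCE B (Python) =====
-- def get_index_different_char(chars: list):
--     bools = [str(c).isalnum() for c in chars]
--     majority = sum(bools[:3]) >= 2
--     for i, b in enumerate(bools):
--         if b != majority:
--             return i
--     return None
-- ===== Notes on version B (the rewrite author's own statement) =====
-- stated objective: simpler
-- what changed: A probes the first three elements with a count and two last-seen-index variables and then runs one of two specialised tail scans; B maps isalnum over the whole list once, takes the majority of the first three booleans, and does a single generic scan for the first element disagreeing with the majority.
import Mathlib
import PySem

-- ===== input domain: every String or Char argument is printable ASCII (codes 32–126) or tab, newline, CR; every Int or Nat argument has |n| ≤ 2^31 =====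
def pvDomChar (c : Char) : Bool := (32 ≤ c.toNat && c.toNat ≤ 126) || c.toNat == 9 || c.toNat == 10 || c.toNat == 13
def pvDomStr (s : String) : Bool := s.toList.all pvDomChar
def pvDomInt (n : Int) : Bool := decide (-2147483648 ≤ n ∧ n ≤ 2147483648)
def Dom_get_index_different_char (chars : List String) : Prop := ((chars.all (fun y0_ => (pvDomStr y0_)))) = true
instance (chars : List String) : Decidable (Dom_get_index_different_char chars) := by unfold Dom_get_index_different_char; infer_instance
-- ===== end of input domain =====

-- B replaces A's probe-the-first-three bookkeeping (count + two last-seen indices + two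
-- specialised tail scans) by one boolean map, a majority test on its first three entries,
-- and a single generic scan for the first entry disagreeing with the majority (objective: simpler).

-- ===== PORT A =====
-- literal port of A: fold over range(3) maintaining (alnum_count, last_alnum_index,
-- last_non_alnum_index), then A's branch structure, each tail loop as find? over range(3, len);
-- the implicit fall-through "return None" is the none of find?
def get_index_different_char (chars : List String) : Option Int :=
  let st : Int × Option Int × Option Int :=
    (PySem.List.pyRange 0 3 1).foldl
      (fun st i =>
        if PySem.Str.strIsalnum (PySem.List.pyGetD chars i "") then
          (st.1 + 1, some i, st.2.2)
        else
          (st.1, st.2.1, some i))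
      (0, none, none)
  if st.1 > 1 then
    match st.2.2 with
    | some j => some j
    | none =>
        (PySem.List.pyRange 3 (PySem.List.len chars) 1).find?
          (fun i => ! PySem.Str.strIsalnum (PySem.List.pyGetD chars i ""))
  else if st.1 < 2 then
    match st.2.1 with
    | some j => some j
    | none =>
        (PySem.List.pyRange 3 (PySem.List.len chars) 1).find?
          (fun i => PySem.Str.strIsalnum (PySem.List.pyGetD chars i ""))
  else none

-- ===== PORT B =====
-- literal port of Source B: bools = [str(c).isalnum() for c in chars];
-- majority = sum(bools[:3]) >= 2; return the first enumerate index whose bool differs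
-- from majority, else None
def get_index_different_char_alt (chars : List String) : Option Int :=
  let bools := chars.map (fun c => PySem.Str.strIsalnum c)
  let majority : Bool :=
    decide (2 ≤ ((PySem.List.slice bools none (some 3)).countP (fun b => b)))
  ((PySem.List.enumerate bools 0).find? (fun p => p.2 != majority)).map (fun p => p.1)

-- ===== PRECONDITION & SPEC =====
-- A raises IndexError (chars[2]) on lists with fewer than 3 elements; Pre_ excludes exactly those.
def Pre_get_index_different_char (chars : List String) : Prop := 3 ≤ chars.length
instance (chars : List String) : Decidable (Pre_get_index_different_char chars) := by unfold Pre_get_index_different_char; infer_instance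
def pvWitness_get_index_different_char : List String := ["a", "b", "!"]

def Spec_get_index_different_char (chars : List String) (out : Option Int) : Prop := out = get_index_different_char_alt chars
instance (chars : List String) (out : Option Int) : Decidable (Spec_get_index_different_char chars out) := by unfold Spec_get_index_different_char; infer_instance

-- ===== CLAIM (what is proved, stated in full; the proofs are below) =====
def Claim_equal_get_index_different_char : Prop := ∀ (chars : List String), Dom_get_index_different_char chars → Pre_get_index_different_char chars → Spec_get_index_different_char chars (get_index_different_char chars)

-- ===== LEMMAS AND PROOFS =====

-- A's tail loop "for i in range(s, len): if isalnum(chars[i]) != t: return i" over the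
-- suffix `rest` equals B's find-first over `enumerate` of the mapped suffix.
theorem tail_scan (rest : List String) (t : Bool) :
    ∀ (s : Int) (full : List String),
      (∀ k : Nat, k < rest.length →
        PySem.List.pyGetD full (s + (k : Int)) "" = rest.getD k "") →
      (PySem.List.pyRange s (s + (rest.length : Int)) 1).find?
          (fun i => PySem.Str.strIsalnum (PySem.List.pyGetD full i "") != t) =
        ((PySem.List.enumerate (rest.map (fun c => PySem.Str.strIsalnum c)) s).find?
          (fun p => p.2 != t)).map (fun p => p.1) := by
  induction rest with
  | nil =>
      intro s full _
      rw [PySem.List.pyRange_one_eq_nil (by simp)]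
      simp
  | cons x xs ih =>
      intro s full h
      have hx : PySem.List.pyGetD full s "" = x := by
        have := h 0 (by simp)
        simpa using this
      rw [show (s + ((List.length (x :: xs) : Nat) : Int)) = s + ((xs.length : Nat) : Int) + 1 by
            push_cast [List.length_cons]; ring,
        PySem.List.pyRange_one_cons (by omega)]
      rw [List.map_cons, PySem.List.enumerate_cons]
      simp only [List.find?_cons, hx]
      cases hs : (PySem.Str.strIsalnum x != t) with
      | true => simp
      | false =>
          rw [show (s + ((xs.length : Nat) : Int) + 1) = (s + 1) + ((xs.length : Nat) : Int) by ring]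
          exact ih (s + 1) full (by
            intro k hk
            have := h (k + 1) (by simp [List.length_cons]; omega)
            rw [show (s + 1 + (k : Int)) = s + ((k + 1 : Nat) : Int) by push_cast; ring]
            simpa [List.getD] using this)

-- the two instances of tail_scan in the simp-normal form the main proof reaches
theorem tail_scan_true (rest : List String) (s : Int) (full : List String)
    (h : ∀ k : Nat, k < rest.length →
      PySem.List.pyGetD full (s + (k : Int)) "" = rest.getD k "") :
    (PySem.List.pyRange s (s + (rest.length : Int)) 1).find?
        (fun i => !PySem.Chars.strIsalnum (PySem.List.pyGetD full i "").toList) =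
      ((PySem.List.enumerate (rest.map (fun c => PySem.Chars.strIsalnum c.toList)) s).find?
        (fun p => !p.2)).map (fun p => p.1) := by
  simpa using tail_scan rest true s full h

theorem tail_scan_false (rest : List String) (s : Int) (full : List String)
    (h : ∀ k : Nat, k < rest.length →
      PySem.List.pyGetD full (s + (k : Int)) "" = rest.getD k "") :
    (PySem.List.pyRange s (s + (rest.length : Int)) 1).find?
        (fun i => PySem.Chars.strIsalnum (PySem.List.pyGetD full i "").toList) =
      ((PySem.List.enumerate (rest.map (fun c => PySem.Chars.strIsalnum c.toList)) s).find?
        (fun p => p.2)).map (fun p => p.1) := by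
  simpa using tail_scan rest false s full h

-- ===== VERDICT (by name: the statement is the Claim_ definition above) =====
theorem get_index_different_char_spec : Claim_equal_get_index_different_char := by
  intro chars _ hpre
  unfold Spec_get_index_different_char
  unfold Pre_get_index_different_char at hpre
  rcases chars with _ | ⟨a, _ | ⟨b, _ | ⟨c, rest⟩⟩⟩
  · simp at hpre
  · simp at hpre
  · simp at hpre
  have r3 : PySem.List.pyRange 0 3 1 = [0, 1, 2] := by decide
  have g0 : PySem.List.pyGetD (a :: b :: c :: rest) (0 : Int) "" = a := by
    rw [PySem.List.pyGetD_ofNat']; rfl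
  have g1 : PySem.List.pyGetD (a :: b :: c :: rest) (1 : Int) "" = b := by
    rw [PySem.List.pyGetD_ofNat']; rfl
  have g2 : PySem.List.pyGetD (a :: b :: c :: rest) (2 : Int) "" = c := by
    rw [PySem.List.pyGetD_ofNat']; rfl
  have hsl : ∀ (l : List Bool), PySem.List.slice l none (some 3) = l.take 3 := fun l => by
    simpa using PySem.List.slice_to (xs := l) (b := 3) (by norm_num)
  have hlen : ∀ k : Nat, k < rest.length →
      PySem.List.pyGetD (a :: b :: c :: rest) ((3 : Int) + (k : Int)) "" = rest.getD k "" := by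
    intro k hk
    rw [show ((3 : Int) + (k : Int)) = ((3 + k : Nat) : Int) by push_cast; ring,
      PySem.List.pyGetD_natCast]
    rw [show 3 + k = k + 1 + 1 + 1 from by omega]
    simp [List.getD, List.getElem?_cons_succ]
  have hL : (PySem.List.len (a :: b :: c :: rest)) = (3 : Int) + (rest.length : Int) := by
    simp [PySem.List.len_eq]; ring
  by_cases ha : PySem.Str.strIsalnum a = true <;>
    by_cases hb : PySem.Str.strIsalnum b = true <;>
      by_cases hc : PySem.Str.strIsalnum c = true <;>
  simp only [get_index_different_char, get_index_different_char_alt, r3, g0, g1, g2, hL,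
    List.foldl, ha, hb, hc, if_true, hsl,
    List.map_cons, List.take_succ_cons, List.take_zero, List.countP_cons, List.countP_nil,
    PySem.List.enumerate_cons, List.find?_cons]
  all_goals norm_num
  · exact tail_scan_true rest 3 _ hlen
  · exact tail_scan_false rest 3 _ hlen
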